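-- pv_equiv track=rewrite | github.com/fas89/forge-cli | fluid_build/providers/aws/util/sovereignty.py | sanitize_tag_value
-- ===== SOURCE A (Python) =====
-- def sanitize_tag_value(value: str) -> str:
--     """
--     Sanitize tag values for AWS tags.
--
--     AWS tag value constraints:
--     - Max 256 characters
--     - Letters, numbers, spaces, and +-=._:/@
--
--     Args:
--         value: Raw tag value
--
--     Returns:
--         Sanitized tag value
--     """
--     if not value:
--         return ""
--
--     # Convert to string and truncate
--     value = str(value)[:256]
--
--     # Replace invalid characters with underscore
--     sanitized = ""
--     valid_chars = set("abcdefghijklmnopqrstuvwxyzABCDEFGHIJKLMNOPQRSTUVWXYZ0123456789 +-=._:/@")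
--     for char in value:
--         sanitized += char if char in valid_chars else "_"
--
--     return sanitized
-- ===== SOURCE B (Python) =====
-- import re
--
-- _INVALID_RE = re.compile(r'[^A-Za-z0-9 +\-=._:/@]')
--
-- def sanitize_tag_value(value: str) -> str:
--     if not value:
--         return ""
--     return _INVALID_RE.sub('_', str(value)[:256])
-- ===== Notes on version B (the rewrite author's own statement) =====
-- stated objective: idiomatic
-- what changed: Replaces the explicit char-by-char loop with string concatenation and a hand-built valid-character set by a single precompiled re.sub over the truncated string, mapping every character outside the allowed class to '_'.
import Mathlib
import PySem

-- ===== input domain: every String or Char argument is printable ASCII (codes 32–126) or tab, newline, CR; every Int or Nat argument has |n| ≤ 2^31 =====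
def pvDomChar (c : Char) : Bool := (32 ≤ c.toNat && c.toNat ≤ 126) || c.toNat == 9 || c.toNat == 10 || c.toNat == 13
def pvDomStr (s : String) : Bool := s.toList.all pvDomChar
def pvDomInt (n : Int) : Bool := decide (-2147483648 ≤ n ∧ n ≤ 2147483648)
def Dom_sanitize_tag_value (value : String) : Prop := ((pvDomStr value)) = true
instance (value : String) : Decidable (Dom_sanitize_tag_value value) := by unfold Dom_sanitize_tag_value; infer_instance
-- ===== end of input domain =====

-- B replaces A's explicit per-character loop (hand-built set, string concatenation) by a single
-- regex substitution mapping every character outside the allowed class to '_' (idiomatic).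


-- ===== PORT A =====
-- valid_chars = set("…") (a Python set; built with PySem.Set.ofList, membership only)
def pvValidChars : PySem.Set Char :=
  PySem.Set.ofList "abcdefghijklmnopqrstuvwxyzABCDEFGHIJKLMNOPQRSTUVWXYZ0123456789 +-=._:/@".toList

def sanitize_tag_value (value : String) : String :=
  if value = "" then ""
  else
    let v := PySem.List.slice value.toList none (some 256)
    let sanitized := v.foldl (fun acc c => acc ++ [if pvValidChars.contains c then c else '_']) []
    String.mk sanitized

-- ===== PORT B =====
-- the regex class [^A-Za-z0-9 +\-=._:/@] as a character predicate; re.sub with a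
-- single-character class is exactly a per-character replacement, ported as List.map.
def pvInvalid (c : Char) : Bool :=
  !(('A' ≤ c && c ≤ 'Z') || ('a' ≤ c && c ≤ 'z') || ('0' ≤ c && c ≤ '9') ||
    " +-=._:/@".toList.contains c)

def sanitize_tag_value_alt (value : String) : String :=
  if value = "" then ""
  else String.mk ((value.toList.take 256).map (fun c => if pvInvalid c then '_' else c))

-- ===== PRECONDITION & SPEC =====
def Spec_sanitize_tag_value (value : String) (out : String) : Prop := out = sanitize_tag_value_alt value
instance (value : String) (out : String) : Decidable (Spec_sanitize_tag_value value out) := by unfold Spec_sanitize_tag_value; infer_instance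

-- ===== CLAIM (what is proved, stated in full; the proofs are below) =====
def Claim_equal_sanitize_tag_value : Prop := ∀ (value : String), Dom_sanitize_tag_value value → Spec_sanitize_tag_value value (sanitize_tag_value value)

-- ===== LEMMAS AND PROOFS =====
theorem pv_foldl_append {α β : Type} (f : α → β) (l : List α) (acc : List β) :
    l.foldl (fun acc c => acc ++ [f c]) acc = acc ++ l.map f := by
  induction l generalizing acc with
  | nil => simp
  | cons x xs ih => simp [List.foldl, ih]

set_option maxRecDepth 10000 in
theorem pv_char_agree (c : Char) (h : pvDomChar c = true) :
    (if pvValidChars.contains c then c else '_') = (if pvInvalid c then '_' else c) := by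
  have hn : c.toNat < 127 := by
    simp only [pvDomChar, Bool.or_eq_true, Bool.and_eq_true, beq_iff_eq,
      decide_eq_true_eq] at h
    omega
  have key : ∀ n, n < 127 →
      (if pvValidChars.contains (Char.ofNat n) then Char.ofNat n else '_') =
      (if pvInvalid (Char.ofNat n) then '_' else Char.ofNat n) := by decide
  have := key c.toNat hn
  rwa [Char.ofNat_toNat] at this

-- ===== VERDICT (by name: the statement is the Claim_ definition above) =====
set_option maxRecDepth 10000 in
theorem sanitize_tag_value_spec : Claim_equal_sanitize_tag_value := by
  intro value hdom
  unfold Spec_sanitize_tag_value sanitize_tag_value sanitize_tag_value_alt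
  by_cases hv : value = ""
  · simp [hv]
  · simp only [hv, if_false]
    have hs : PySem.List.slice value.toList none (some (256:Int)) = value.toList.take 256 := by
      rw [PySem.List.slice_to _ (by norm_num)]
      congr 1
    rw [hs, pv_foldl_append]
    simp only [List.nil_append]
    congr 1
    apply List.map_congr_left
    intro c hc
    have hcm : c ∈ value.toList := List.mem_of_mem_take hc
    have : pvDomChar c = true := by
      unfold Dom_sanitize_tag_value pvDomStr at hdom
      exact List.all_eq_true.mp hdom c hcm
    exact pv_char_agree c this
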